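-- pv_equiv track=rewrite | github.com/thanyathonk/read_pdf_anything | server/app/services/rag_service.py | _is_likely_general_question
-- ===== SOURCE A (Python) =====
-- def _is_likely_general_question(query: str) -> bool:
--     """Fast heuristic for obvious general questions (avoids extra LLM call)"""
--     q = query.strip().lower()
--     if not q:
--         return True
--     prefixes = (
--         "what is ",
--         "what are ",
--         "who is ",
--         "who are ",
--         "when did ",
--         "when was ",
--         "where is ",
--         "where are ",
--         "how does ",
--         "how do ",
--         "how can ",
--         "how would ",
--         "why does ",
--         "why do ",
--         "why is ",
--         "define ",
--         "explain ",
--         "describe ",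
--     )
--     return any(q.startswith(p) for p in prefixes)
-- ===== SOURCE B (Python) =====
-- # B: length-bucketed exact-slice set lookup instead of a linear startswith scan.
-- _BY_LEN = {
--     7: {"who is ", "how do ", "why do ", "why is ", "define "},
--     8: {"what is ", "who are ", "how can ", "explain "},
--     9: {"what are ", "when did ", "when was ", "where is ", "how does ",
--         "why does ", "describe "},
--     10: {"where are ", "how would "},
-- }
--
-- def _is_likely_general_question(query: str) -> bool:
--     q = query.strip().lower()
--     if not q:
--         return True
--     return any(q[:L] in group for L, group in _BY_LEN.items())
-- ===== Notes on version B (the rewrite author's own statement) =====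
-- stated objective: alternative
-- what changed: Replaces the linear any-startswith scan over 18 prefixes with a precomputed length->set-of-prefixes table probed by exact slice q[:L] set membership, one probe per distinct prefix length.
import Mathlib
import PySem

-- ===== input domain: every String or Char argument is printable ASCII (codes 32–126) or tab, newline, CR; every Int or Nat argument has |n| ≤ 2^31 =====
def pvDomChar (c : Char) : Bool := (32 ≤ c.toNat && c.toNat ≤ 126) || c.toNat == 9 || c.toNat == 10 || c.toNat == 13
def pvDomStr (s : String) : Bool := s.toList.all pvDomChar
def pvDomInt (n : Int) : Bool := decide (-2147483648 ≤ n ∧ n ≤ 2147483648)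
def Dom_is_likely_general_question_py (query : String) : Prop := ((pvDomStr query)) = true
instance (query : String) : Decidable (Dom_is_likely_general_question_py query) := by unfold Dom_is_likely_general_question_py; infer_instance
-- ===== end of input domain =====

-- B replaces the linear startswith scan with a length-bucketed exact-slice set lookup (alternative decomposition; same behaviour).

-- ===== PORT A =====
def pvPrefixes : List String :=
  ["what is ", "what are ", "who is ", "who are ", "when did ", "when was ",
   "where is ", "where are ", "how does ", "how do ", "how can ", "how would ",
   "why does ", "why do ", "why is ", "define ", "explain ", "describe "]

def is_likely_general_question_py (query : String) : Bool :=
  let q := PySem.Str.lower (PySem.Str.strip query)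
  if PySem.Str.len q = 0 then true
  else pvPrefixes.any (fun p => PySem.Str.startswith q p)

-- ===== PORT B =====
def pvByLen : List (Int × PySem.Set String) :=
  [(7, PySem.Set.ofList ["who is ", "how do ", "why do ", "why is ", "define "]),
   (8, PySem.Set.ofList ["what is ", "who are ", "how can ", "explain "]),
   (9, PySem.Set.ofList ["what are ", "when did ", "when was ", "where is ",
                         "how does ", "why does ", "describe "]),
   (10, PySem.Set.ofList ["where are ", "how would "])]

def is_likely_general_question_py_alt (query : String) : Bool :=
  let q := PySem.Str.lower (PySem.Str.strip query)
  if PySem.Str.len q = 0 then true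
  else pvByLen.any (fun g => PySem.Set.contains g.2 (PySem.Str.slice q none (some g.1)))

-- ===== PRECONDITION & SPEC =====
def Spec_is_likely_general_question_py (query : String) (out : Bool) : Prop := out = is_likely_general_question_py_alt query
instance (query : String) (out : Bool) : Decidable (Spec_is_likely_general_question_py query out) := by unfold Spec_is_likely_general_question_py; infer_instance

-- ===== CLAIM (what is proved, stated in full; the proofs are below) =====
def Claim_equal_is_likely_general_question_py : Prop := ∀ (query : String), Dom_is_likely_general_question_py query → Spec_is_likely_general_question_py query (is_likely_general_question_py query)

-- ===== LEMMAS AND PROOFS =====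

-- startswith q p is the same test as q[:len p] == p (Python's own equivalence)
lemma startswith_eq_take (q p : String) (n : Int) (h : (p.toList.length : Int) = n) :
    PySem.Str.startswith q p = (PySem.Str.slice q none (some n) == p) := by
  subst h
  have h2 : (PySem.Str.slice q none (some ((p.toList.length : Nat) : Int))).toList
      = q.toList.take p.toList.length := by
    simp [PySem.Str.toList_slice, PySem.List.slice_to_natCast]
  have hA : (PySem.Str.startswith q p = true) ↔ p.toList <+: q.toList := by
    simp [PySem.Chars.startswith_iff]
  have hB : ((PySem.Str.slice q none (some ((p.toList.length : Nat) : Int)) == p) = true)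
      ↔ p.toList <+: q.toList := by
    rw [beq_iff_eq]
    constructor
    · intro he
      rw [List.prefix_iff_eq_take]
      have h3 := congrArg String.toList he
      rw [h2] at h3
      exact h3.symm
    · intro hp
      apply String.ext
      rw [h2]
      exact (List.prefix_iff_eq_take.mp hp).symm
  rw [Bool.eq_iff_iff, hA, hB]

-- ===== VERDICT (by name: the statement is the Claim_ definition above) =====
set_option maxHeartbeats 1000000 in
theorem is_likely_general_question_py_spec : Claim_equal_is_likely_general_question_py := by
  intro query _
  unfold Spec_is_likely_general_question_py is_likely_general_question_py is_likely_general_question_py_alt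
  generalize PySem.Str.lower (PySem.Str.strip query) = q
  by_cases h0 : PySem.Str.len q = 0
  · rw [if_pos h0, if_pos h0]
  · rw [if_neg h0, if_neg h0]
    rw [show pvByLen = [((7:Int), ["who is ", "how do ", "why do ", "why is ", "define "]),
        ((8:Int), ["what is ", "who are ", "how can ", "explain "]),
        ((9:Int), ["what are ", "when did ", "when was ", "where is ",
                   "how does ", "why does ", "describe "]),
        ((10:Int), ["where are ", "how would "])] from by
      unfold pvByLen
      rw [PySem.Set.ofList_eq_self_of_nodup _ (by decide),
          PySem.Set.ofList_eq_self_of_nodup _ (by decide),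
          PySem.Set.ofList_eq_self_of_nodup _ (by decide),
          PySem.Set.ofList_eq_self_of_nodup _ (by decide)]]
    simp only [pvPrefixes, List.any_cons, List.any_nil, PySem.Set.contains,
      List.contains_cons, List.contains_nil]
    rw [startswith_eq_take q "what is " 8 (by decide),
        startswith_eq_take q "what are " 9 (by decide),
        startswith_eq_take q "who is " 7 (by decide),
        startswith_eq_take q "who are " 8 (by decide),
        startswith_eq_take q "when did " 9 (by decide),
        startswith_eq_take q "when was " 9 (by decide),
        startswith_eq_take q "where is " 9 (by decide),
        startswith_eq_take q "where are " 10 (by decide),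
        startswith_eq_take q "how does " 9 (by decide),
        startswith_eq_take q "how do " 7 (by decide),
        startswith_eq_take q "how can " 8 (by decide),
        startswith_eq_take q "how would " 10 (by decide),
        startswith_eq_take q "why does " 9 (by decide),
        startswith_eq_take q "why do " 7 (by decide),
        startswith_eq_take q "why is " 7 (by decide),
        startswith_eq_take q "define " 7 (by decide),
        startswith_eq_take q "explain " 8 (by decide),
        startswith_eq_take q "describe " 9 (by decide)]
    simp only [Bool.or_false]
    ac_rfl
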